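-- pv_equiv track=rewrite | github.com/amandamurphy2025/projects | CMSC_14100/homework_5.py | find_region_locations
-- ===== SOURCE A (Python) =====
-- def find_region_locations(image, loc, radius):
--     """
--     Finds the region of locations around a specified pixel location.
--
--     Input:
--         image (list of lists of tuples): image with multiple RBG values
--         loc (tuple): location (column and row) to find region around
--         radius (int): how many pixels from loc to assess region.  measures how
--         many units to right, left, up, and down to assess, and fills in corners
--         so the region is a perfect square.
--
--     Output:
--         region (list of tuples): locations around loc within the radius
--     """
--
--     row_loc = []
--
--     for idx, row in enumerate(image):
--         for idx_pix, _ in enumerate(row):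
--             t = (idx, idx_pix)
--             row_loc.append(t)
--
--     region = []
--
--     for c, r in row_loc:
--         if (((loc[0] - radius) <= c <= (loc[0] + radius)) and
--             ((loc[1] - radius) <= r <= (loc[1]+radius))):
--             region.append((c, r))
--
--     return region
-- ===== SOURCE B (Python) =====
-- def find_region_locations(image, loc, radius):
--     region = []
--     c_lo = max(0, loc[0] - radius)
--     c_hi = min(len(image) - 1, loc[0] + radius)
--     for c in range(c_lo, c_hi + 1):
--         r_lo = max(0, loc[1] - radius)
--         r_hi = min(len(image[c]) - 1, loc[1] + radius)
--         for r in range(r_lo, r_hi + 1):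
--             region.append((c, r))
--     return region
-- ===== Notes on version B (the rewrite author's own statement) =====
-- stated objective: faster
-- what changed: Instead of enumerating every pixel of the image and filtering each against the radius window, B iterates only the clamped window of row indices and, per row, the clamped window of column indices, emitting locations directly in the same row-major order.
import Mathlib
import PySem

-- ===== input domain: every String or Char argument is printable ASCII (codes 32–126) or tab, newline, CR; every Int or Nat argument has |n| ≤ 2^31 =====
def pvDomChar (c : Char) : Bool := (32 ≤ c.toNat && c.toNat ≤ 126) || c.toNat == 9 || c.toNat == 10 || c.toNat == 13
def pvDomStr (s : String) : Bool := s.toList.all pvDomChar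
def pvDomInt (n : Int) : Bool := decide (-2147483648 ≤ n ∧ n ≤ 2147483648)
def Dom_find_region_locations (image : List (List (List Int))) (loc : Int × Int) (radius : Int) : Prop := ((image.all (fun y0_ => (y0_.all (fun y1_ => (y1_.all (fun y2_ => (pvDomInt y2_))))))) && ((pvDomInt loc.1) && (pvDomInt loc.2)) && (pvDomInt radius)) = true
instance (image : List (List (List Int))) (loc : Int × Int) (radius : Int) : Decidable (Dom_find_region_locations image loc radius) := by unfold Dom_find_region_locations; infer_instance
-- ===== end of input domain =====

-- B iterates only the clamped (radius-window ∩ image) index rectangle instead of scanning every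
-- pixel of the image: objective 'faster' (O(window) vs O(W*H) pixel scan).

-- ===== PORT A =====
-- literal transliteration of A: build row_loc = all (row, col) pixel locations, then filter.
def find_region_locations (image : List (List (List Int))) (loc : Int × Int) (radius : Int) : List (Int × Int) :=
  let row_loc : List (Int × Int) :=
    (PySem.List.enumerate image).foldl (fun acc p =>
      (PySem.List.enumerate p.2).foldl (fun acc2 q => acc2 ++ [(p.1, q.1)]) acc) []
  row_loc.foldl (fun region p =>
    if (decide (loc.1 - radius ≤ p.1) && decide (p.1 ≤ loc.1 + radius)) &&
       (decide (loc.2 - radius ≤ p.2) && decide (p.2 ≤ loc.2 + radius))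
    then region ++ [(p.1, p.2)] else region) []

-- ===== PORT B =====
-- transliteration of B (Source B): iterate only the clamped coordinate window, row-major.
-- image[c] is always in range here; '.getD []' only totalizes the lookup.
def find_region_locations_alt (image : List (List (List Int))) (loc : Int × Int) (radius : Int) : List (Int × Int) :=
  let c_lo := max 0 (loc.1 - radius)
  let c_hi := min ((image.length : Int) - 1) (loc.1 + radius)
  (PySem.List.pyRange c_lo (c_hi + 1)).foldl (fun region c =>
    let row := (PySem.List.pyGet? image c).getD []
    let r_lo := max 0 (loc.2 - radius)
    let r_hi := min ((row.length : Int) - 1) (loc.2 + radius)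
    (PySem.List.pyRange r_lo (r_hi + 1)).foldl (fun region2 r => region2 ++ [(c, r)]) region) []

-- ===== PRECONDITION & SPEC =====
def Spec_find_region_locations (image : List (List (List Int))) (loc : Int × Int) (radius : Int) (out : List (Int × Int)) : Prop := out = find_region_locations_alt image loc radius
instance (image : List (List (List Int))) (loc : Int × Int) (radius : Int) (out : List (Int × Int)) : Decidable (Spec_find_region_locations image loc radius out) := by unfold Spec_find_region_locations; infer_instance

-- ===== CLAIM (what is proved, stated in full; the proofs are below) =====
def Claim_equal_find_region_locations : Prop := ∀ (image : List (List (List Int))) (loc : Int × Int) (radius : Int), Dom_find_region_locations image loc radius → Spec_find_region_locations image loc radius (find_region_locations image loc radius)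

-- ===== LEMMAS AND PROOFS =====

-- the clamped window range is the window-filtered full index range
lemma pv_win (a b : Int) (n : Nat) :
    PySem.List.pyRange (max 0 a) (min ((n : Int) - 1) b + 1) =
    (PySem.List.pyRange 0 (n : Int)).filter (fun x => decide (a ≤ x) && decide (x ≤ b)) := by
  apply List.Perm.eq_of_pairwise (le := (· < ·))
  · intro p q _ _ h1 h2; omega
  · exact PySem.List.pairwise_lt_pyRange_one _ _
  · exact (PySem.List.pairwise_lt_pyRange_one _ _).filter _
  · rw [List.perm_ext_iff_of_nodup (PySem.List.nodup_pyRange_one _ _)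
      ((PySem.List.nodup_pyRange_one _ _).filter _)]
    intro x
    simp only [PySem.List.mem_pyRange_one, List.mem_filter, Bool.and_eq_true, decide_eq_true_eq]
    omega

lemma pv_flatMap_filter {α β : Type} (p : α → Bool) (f : α → List β) (l : List α) :
    (l.filter p).flatMap f = l.flatMap (fun x => if p x then f x else []) := by
  induction l with
  | nil => simp
  | cons x t ih => by_cases h : p x <;> simp [h, ih]

lemma pv_pyGet?_cons_pos {α : Type} (x : α) (t : List α) (k : Int) (hk : 1 ≤ k) :
    PySem.List.pyGet? (x :: t) k = PySem.List.pyGet? t (k - 1) := by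
  simp only [PySem.List.pyGet?, PySem.List.pyIdx?, List.length_cons]
  have h0 : (0 : Int) ≤ k := by omega
  have h1 : (0 : Int) ≤ k - 1 := by omega
  simp only [h0, h1, if_pos]
  push_cast
  split_ifs with hlt hlt' hlt'
  · have hnat : k.toNat = (k - 1).toNat + 1 := by omega
    rw [hnat]
    show (x :: t)[(k - 1).toNat + 1]? = t[(k - 1).toNat]?
    exact List.getElem?_cons_succ
  · omega
  · omega
  · rfl

-- the clamped range with absolute indexing enumerates the rows
lemma pv_range_enum {α : Type} (d : α) :
    ∀ (xs : List α) (s : Int),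
    (PySem.List.pyRange s (s + (xs.length : Int))).map
      (fun c => ((c : Int), (PySem.List.pyGet? xs (c - s)).getD d)) = PySem.List.enumerate xs s := by
  intro xs
  induction xs with
  | nil => intro s; simp
  | cons x t ih =>
    intro s
    have hb : s + ((t.length + 1 : Nat) : Int) = (s + 1) + (t.length : Int) := by push_cast; omega
    have hlt : s < (s + 1) + (t.length : Int) := by omega
    rw [List.length_cons, hb, PySem.List.pyRange_one_cons hlt, List.map_cons,
        PySem.List.enumerate_cons]
    congr 1
    · simp [PySem.List.pyGet?, PySem.List.pyIdx?]
    · rw [← ih (s + 1)]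
      apply List.map_congr_left
      intro c hc
      have hc1 : s + 1 ≤ c := (PySem.List.mem_pyRange_one.mp hc).1
      rw [pv_pyGet?_cons_pos x t (c - s) (by omega)]
      have h2 : c - s - 1 = c - (s + 1) := by ring
      rw [h2]


-- per-row: A's filtered pixel row equals B's clamped column window (empty when the row is
-- outside the row window)
lemma pv_row (loc : Int × Int) (radius : Int) (p : Int × List (List Int)) :
    (List.map (fun q : Int × List Int => (p.1, q.1)) (PySem.List.enumerate p.2)).filter
      (fun x : Int × Int => (decide (loc.1 - radius ≤ x.1) && decide (x.1 ≤ loc.1 + radius)) &&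
        (decide (loc.2 - radius ≤ x.2) && decide (x.2 ≤ loc.2 + radius)))
    = if (decide (loc.1 - radius ≤ p.1) && decide (p.1 ≤ loc.1 + radius)) then
        (PySem.List.pyRange (max 0 (loc.2 - radius))
          (min ((p.2.length : Int) - 1) (loc.2 + radius) + 1)).map (fun r => (p.1, r))
      else [] := by
  rw [List.filter_map]
  by_cases hc : (decide (loc.1 - radius ≤ p.1) && decide (p.1 ≤ loc.1 + radius)) = true
  · rw [if_pos hc, pv_win (loc.2 - radius) (loc.2 + radius) p.2.length]
    have hfst := PySem.List.map_fst_enumerate p.2 0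
    rw [zero_add] at hfst
    rw [← hfst, List.filter_map, List.map_map]
    simp only [Function.comp_def, hc, Bool.true_and]
  · rw [if_neg hc]
    rw [Bool.not_eq_true] at hc
    simp only [Bool.and_eq_false_iff, decide_eq_false_iff_not, not_le] at hc
    simp [Function.comp_def]
    intros
    omega

-- ===== VERDICT (by name: the statement is the Claim_ definition above) =====
theorem find_region_locations_spec : Claim_equal_find_region_locations := by
  intro image loc radius _
  unfold Spec_find_region_locations find_region_locations find_region_locations_alt
  simp only [PySem.List.foldl_append_singleton_eq_map, PySem.List.foldl_append_eq_flatMap,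
    PySem.List.foldl_append_if, List.nil_append]
  -- A side: filter of the full pixel list
  rw [pv_win (loc.1 - radius) (loc.1 + radius) image.length, pv_flatMap_filter]
  rw [← List.flatMap_map
      (fun c => ((c : Int), (PySem.List.pyGet? image c).getD ([] : List (List Int))))
      (fun p : Int × List (List Int) =>
        if decide (loc.1 - radius ≤ p.1) && decide (p.1 ≤ loc.1 + radius) then
          (PySem.List.pyRange (max 0 (loc.2 - radius))
            (min ((p.2.length : Int) - 1) (loc.2 + radius) + 1)).map (fun r => (p.1, r))
        else [])]
  have henum := pv_range_enum ([] : List (List Int)) image 0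
  simp only [zero_add, sub_zero] at henum
  rw [henum, List.filter_flatMap]
  simp only [Prod.mk.eta, List.map_id']
  exact List.flatMap_congr (fun p _ => pv_row loc radius p)
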